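-- pv_equiv track=rewrite | github.com/elric3179/Advent_Of_Code_2024 | Day_15/15.py | wall_behind
-- ===== SOURCE A (Python) =====
-- def ta(t1, t2):
--     assert len(t1)==len(t2)
--     return [t1[i]+t2[i] for i in range(len(t1))]
--
-- def wall_behind(pos_from, pos_to, boxes, walls):
--     vector = (pos_to[0]-pos_from[0], pos_to[1]-pos_from[1])
--     n_pos = ta(pos_to, vector)
--     if (n_pos[0], n_pos[1]) in walls:
--         return True
--     elif n_pos in boxes:
--         return wall_behind(pos_to, n_pos, boxes, walls)
--     return False
-- ===== SOURCE B (Python) =====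
-- def wall_behind(pos_from, pos_to, boxes, walls):
--     vec = (pos_to[0] - pos_from[0], pos_to[1] - pos_from[1])
--     current = pos_to
--     while True:
--         n_pos = [current[0] + vec[0], current[1] + vec[1]]
--         if (n_pos[0], n_pos[1]) in walls:
--             return True
--         if n_pos in boxes:
--             current = n_pos
--         else:
--             return False
-- ===== Notes on version B (the rewrite author's own statement) =====
-- stated objective: simpler
-- what changed: Replaces A's recursion (which rebuilds the step vector from the last two positions and re-adds via the ta helper each call) with a single while loop that computes the vector once and walks forward with a current pointer.
import Mathlib
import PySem

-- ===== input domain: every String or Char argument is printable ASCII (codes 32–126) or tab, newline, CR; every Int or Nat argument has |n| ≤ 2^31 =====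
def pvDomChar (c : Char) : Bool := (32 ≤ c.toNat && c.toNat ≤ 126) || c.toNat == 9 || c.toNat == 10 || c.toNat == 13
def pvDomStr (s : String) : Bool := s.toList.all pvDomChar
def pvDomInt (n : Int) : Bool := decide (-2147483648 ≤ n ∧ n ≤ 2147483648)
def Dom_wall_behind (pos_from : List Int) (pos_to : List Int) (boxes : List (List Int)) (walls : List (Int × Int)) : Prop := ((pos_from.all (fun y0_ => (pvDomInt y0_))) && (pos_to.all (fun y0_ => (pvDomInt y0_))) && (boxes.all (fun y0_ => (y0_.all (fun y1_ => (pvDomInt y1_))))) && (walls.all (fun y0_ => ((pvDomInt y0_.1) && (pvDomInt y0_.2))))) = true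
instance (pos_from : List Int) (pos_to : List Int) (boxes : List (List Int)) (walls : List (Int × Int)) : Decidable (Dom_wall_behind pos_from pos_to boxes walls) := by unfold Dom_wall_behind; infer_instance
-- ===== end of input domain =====

-- B replaces A's recursion with a single while loop (vector computed once, a current
-- pointer walked forward); objective: simpler.
-- Both ports are totalized with fuel boxes.length+1, which is always enough inside
-- Pre_wall_behind (each continuing step consumes a distinct box position).

-- ===== PORT A =====
-- helper ta: under Pre_ both lists have length 2, so every index is in range and getD is exact
def pvTa (t1 t2 : List Int) : List Int :=
  (List.range t1.length).map (fun i => t1.getD i 0 + t2.getD i 0)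

-- literal recursion of A, totalized with fuel (returns false only on fuel exhaustion,
-- unreachable inside Pre_wall_behind)
def wallBehindGo (fuel : Nat) (pos_from pos_to : List Int) (boxes : List (List Int)) (walls : List (Int × Int)) : Bool :=
  match fuel with
  | 0 => false
  | fuel + 1 =>
    let vector : Int × Int := (pos_to.getD 0 0 - pos_from.getD 0 0, pos_to.getD 1 0 - pos_from.getD 1 0)
    let n_pos := pvTa pos_to [vector.1, vector.2]
    if (n_pos.getD 0 0, n_pos.getD 1 0) ∈ walls then true
    else if n_pos ∈ boxes then wallBehindGo fuel pos_to n_pos boxes walls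
    else false

def wall_behind (pos_from : List Int) (pos_to : List Int) (boxes : List (List Int)) (walls : List (Int × Int)) : Bool :=
  wallBehindGo (boxes.length + 1) pos_from pos_to boxes walls

-- ===== PORT B =====
-- the while-True loop of Source B, totalized with the same fuel bound
def wallBehindLoop (fuel : Nat) (current : List Int) (vec : Int × Int) (boxes : List (List Int)) (walls : List (Int × Int)) : Bool :=
  match fuel with
  | 0 => false
  | fuel + 1 =>
    let n_pos := [current.getD 0 0 + vec.1, current.getD 1 0 + vec.2]
    if (n_pos.getD 0 0, n_pos.getD 1 0) ∈ walls then true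
    else if n_pos ∈ boxes then wallBehindLoop fuel n_pos vec boxes walls
    else false

def wall_behind_alt (pos_from : List Int) (pos_to : List Int) (boxes : List (List Int)) (walls : List (Int × Int)) : Bool :=
  wallBehindLoop (boxes.length + 1) pos_to
    (pos_to.getD 0 0 - pos_from.getD 0 0, pos_to.getD 1 0 - pos_from.getD 1 0) boxes walls

-- ===== PRECONDITION & SPEC =====
-- Pre_ excludes only inputs on which the Python A does not return: len(pos_from) < 2 or
-- len(pos_to) ≠ 2 (IndexError / ta's assert fails), and the zero-vector self-box case on
-- which A recurses forever (RecursionError).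
def Pre_wall_behind (pos_from : List Int) (pos_to : List Int) (boxes : List (List Int)) (walls : List (Int × Int)) : Prop :=
  2 ≤ pos_from.length ∧ pos_to.length = 2 ∧
  ¬ (pos_from.getD 0 0 = pos_to.getD 0 0 ∧ pos_from.getD 1 0 = pos_to.getD 1 0 ∧
     pos_to ∈ boxes ∧ (pos_to.getD 0 0, pos_to.getD 1 0) ∉ walls)
instance (pos_from : List Int) (pos_to : List Int) (boxes : List (List Int)) (walls : List (Int × Int)) : Decidable (Pre_wall_behind pos_from pos_to boxes walls) := by unfold Pre_wall_behind; infer_instance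

def pvWitness_wall_behind : List Int × List Int × List (List Int) × (List (Int × Int)) :=
  ([0, 0], [0, 1], [[0, 2]], [(0, 3)])

def Spec_wall_behind (pos_from : List Int) (pos_to : List Int) (boxes : List (List Int)) (walls : List (Int × Int)) (out : Bool) : Prop := out = wall_behind_alt pos_from pos_to boxes walls
instance (pos_from : List Int) (pos_to : List Int) (boxes : List (List Int)) (walls : List (Int × Int)) (out : Bool) : Decidable (Spec_wall_behind pos_from pos_to boxes walls out) := by unfold Spec_wall_behind; infer_instance

-- ===== CLAIM (what is proved, stated in full; the proofs are below) =====
def Claim_equal_wall_behind : Prop := ∀ (pos_from : List Int) (pos_to : List Int) (boxes : List (List Int)) (walls : List (Int × Int)), Dom_wall_behind pos_from pos_to boxes walls → Pre_wall_behind pos_from pos_to boxes walls → Spec_wall_behind pos_from pos_to boxes walls (wall_behind pos_from pos_to boxes walls)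

-- ===== LEMMAS AND PROOFS =====

-- on a length-2 list, pvTa adds the two components of [v1, v2]
theorem pvTa_len2 (t1 : List Int) (h : t1.length = 2) (v1 v2 : Int) :
    pvTa t1 [v1, v2] = [t1.getD 0 0 + v1, t1.getD 1 0 + v2] := by
  simp [pvTa, h, List.range_succ]

-- core invariant: with pos_to of length 2, A's recursion and B's loop agree at equal fuel
theorem go_eq_loop (fuel : Nat) : ∀ (pos_from pos_to : List Int)
    (boxes : List (List Int)) (walls : List (Int × Int)), pos_to.length = 2 →
    wallBehindGo fuel pos_from pos_to boxes walls =
      wallBehindLoop fuel pos_to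
        (pos_to.getD 0 0 - pos_from.getD 0 0, pos_to.getD 1 0 - pos_from.getD 1 0) boxes walls := by
  induction fuel with
  | zero => intro _ _ _ _ _; rfl
  | succ fuel ih =>
    intro pos_from pos_to boxes walls h2
    simp only [wallBehindGo, wallBehindLoop,
      pvTa_len2 pos_to h2 (pos_to.getD 0 0 - pos_from.getD 0 0) (pos_to.getD 1 0 - pos_from.getD 1 0)]
    split_ifs with hw hb
    · rfl
    · rw [ih pos_to _ boxes walls (by simp)]
      congr 2 <;> simp [List.getD] <;> ring
    · rfl

theorem wall_behind_spec : Claim_equal_wall_behind := by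
  intro pos_from pos_to boxes walls _ hpre
  unfold Spec_wall_behind wall_behind wall_behind_alt
  exact go_eq_loop (boxes.length + 1) pos_from pos_to boxes walls hpre.2.1
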